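-- pv_equiv track=rewrite | github.com/starlikab/gmfold_pipeline | src/gmfold_pipeline/proportion_matrix.py | compute_descriptor_motzkin
-- ===== SOURCE A (Python) =====
-- def compute_descriptor_motzkin(input_string):
--     descriptor = []
--     sum = 0
--     for count, char in enumerate(input_string):
--         if char == '(':
--             sum +=1
--             descriptor.append(sum)
--         elif char == ')':
--             sum -=1
--             descriptor.append(sum)
--         elif char == '.':
--             descriptor.append(sum)
--     return descriptor
-- ===== SOURCE B (Python) =====
-- def compute_descriptor_motzkin(input_string):
--     deltas = [1 if c == '(' else -1 if c == ')' else 0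
--               for c in input_string if c in '().']
--     total = sum(deltas)
--     out = []
--     for d in reversed(deltas):
--         out.append(total)
--         total -= d
--     out.reverse()
--     return out
-- ===== Notes on version B (the rewrite author's own statement) =====
-- stated objective: alternative
-- what changed: Instead of accumulating a running sum left-to-right, B first computes the grand total of the bracket deltas, then constructs the result back-to-front by walking the deltas in reverse and subtracting, finally reversing the built list.
import Mathlib
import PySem

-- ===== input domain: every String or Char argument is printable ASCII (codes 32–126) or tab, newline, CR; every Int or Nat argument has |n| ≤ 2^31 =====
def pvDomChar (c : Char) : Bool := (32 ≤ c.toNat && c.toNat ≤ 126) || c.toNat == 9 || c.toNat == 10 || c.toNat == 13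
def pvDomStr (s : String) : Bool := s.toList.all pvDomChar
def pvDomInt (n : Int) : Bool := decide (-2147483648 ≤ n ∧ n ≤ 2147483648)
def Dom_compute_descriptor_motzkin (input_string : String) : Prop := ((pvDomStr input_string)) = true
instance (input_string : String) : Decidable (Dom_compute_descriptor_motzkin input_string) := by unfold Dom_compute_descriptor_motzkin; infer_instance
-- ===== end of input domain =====

-- B replaces A's left-to-right running-sum loop by a two-phase scheme: total of the deltas first, then a reverse walk building the result back-to-front; same values, alternative construction.

-- ===== PORT A =====
-- literal port: fold over the characters keeping (descriptor, sum), branches in A's order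
def compute_descriptor_motzkin (input_string : String) : List Int :=
  (input_string.toList.foldl
    (fun (st : List Int × Int) char =>
      let (descriptor, sum) := st
      if char = '(' then (descriptor ++ [sum + 1], sum + 1)
      else if char = ')' then (descriptor ++ [sum - 1], sum - 1)
      else if char = '.' then (descriptor ++ [sum], sum)
      else (descriptor, sum))
    ([], 0)).1

-- ===== PORT B =====
-- deltas = [1 if c=='(' else -1 if c==')' else 0 for c in input_string if c in '().']
def pvDeltas (cs : List Char) : List Int :=
  cs.filterMap (fun c =>
    if c = '(' then some 1 else if c = ')' then some (-1)
    else if c = '.' then some 0 else none)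

def compute_descriptor_motzkin_alt (input_string : String) : List Int :=
  let deltas := pvDeltas input_string.toList
  let total := deltas.foldl (· + ·) 0       -- sum(deltas)
  -- for d in reversed(deltas): out.append(total); total -= d
  let st := deltas.reverse.foldl (fun (st : List Int × Int) d => (st.1 ++ [st.2], st.2 - d)) ([], total)
  st.1.reverse

-- ===== PRECONDITION & SPEC =====
def Spec_compute_descriptor_motzkin (input_string : String) (out : List Int) : Prop := out = compute_descriptor_motzkin_alt input_string
instance (input_string : String) (out : List Int) : Decidable (Spec_compute_descriptor_motzkin input_string out) := by unfold Spec_compute_descriptor_motzkin; infer_instance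

-- ===== CLAIM (what is proved, stated in full; the proofs are below) =====
def Claim_equal_compute_descriptor_motzkin : Prop := ∀ (input_string : String), Dom_compute_descriptor_motzkin input_string → Spec_compute_descriptor_motzkin input_string (compute_descriptor_motzkin input_string)

-- ===== LEMMAS AND PROOFS =====
-- prefix sums starting from a
def pvAcc (a : Int) : List Int → List Int
  | [] => []
  | d :: ds => (a + d) :: pvAcc (a + d) ds

-- the back-to-front list B's reverse loop builds (before the final reverse)
def pvBack (t : Int) : List Int → List Int
  | [] => []
  | d :: rs => t :: pvBack (t - d) rs

theorem pv_fold_eq (cs : List Char) (acc : List Int) (sum : Int) :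
    (cs.foldl
      (fun (st : List Int × Int) char =>
        let (descriptor, s) := st
        if char = '(' then (descriptor ++ [s + 1], s + 1)
        else if char = ')' then (descriptor ++ [s - 1], s - 1)
        else if char = '.' then (descriptor ++ [s], s)
        else (descriptor, s))
      (acc, sum)).1
    = acc ++ pvAcc sum (pvDeltas cs) := by
  induction cs generalizing acc sum with
  | nil => simp [pvAcc, pvDeltas]
  | cons c cs ih =>
    by_cases h1 : c = '('
    · simp [h1, List.foldl_cons, ih, pvAcc, pvDeltas]
    · by_cases h2 : c = ')'
      · have h := ih (acc ++ [sum - 1]) (sum - 1)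
        simp only [List.foldl_cons, if_neg h1, if_pos h2]
        rw [h]
        simp [h2, pvAcc, pvDeltas, sub_eq_add_neg]
      · by_cases h3 : c = '.'
        · simp [h3, List.foldl_cons, ih, pvAcc, pvDeltas]
        · simp [h1, h2, h3, List.foldl_cons, ih, pvDeltas]

theorem pv_foldl_shift (a : Int) (l : List Int) : l.foldl (· + ·) a = a + l.foldl (· + ·) 0 := by
  induction l generalizing a with
  | nil => simp
  | cons x l ihl => simp only [List.foldl_cons]; rw [ihl (a + x), ihl (0 + x)]; ring

theorem pv_backfold_eq (rs : List Int) (out : List Int) (t : Int) :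
    rs.foldl (fun (st : List Int × Int) d => (st.1 ++ [st.2], st.2 - d)) (out, t)
    = (out ++ pvBack t rs, t - rs.foldl (· + ·) 0) := by
  induction rs generalizing out t with
  | nil => simp [pvBack]
  | cons d rs ih =>
    simp only [List.foldl_cons, ih, pvBack, List.append_assoc, List.singleton_append,
      Prod.mk.injEq]
    refine ⟨trivial, ?_⟩
    rw [pv_foldl_shift (0 + d) rs]; ring

theorem pv_acc_append (xs : List Int) (d a : Int) :
    pvAcc a (xs ++ [d]) = pvAcc a xs ++ [a + xs.foldl (· + ·) 0 + d] := by
  induction xs generalizing a with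
  | nil => simp [pvAcc]
  | cons x xs ih =>
    simp only [List.cons_append, pvAcc, ih, List.foldl_cons]
    rw [pv_foldl_shift (0 + x) xs]
    simp; ring_nf

theorem pv_back_reverse (ds : List Int) :
    (pvBack (ds.foldl (· + ·) 0) ds.reverse).reverse = pvAcc 0 ds := by
  induction ds using List.reverseRecOn with
  | nil => simp [pvBack, pvAcc]
  | append_singleton ds d ih =>
    have hsum : (ds ++ [d]).foldl (· + ·) 0 = ds.foldl (· + ·) 0 + d := by
      rw [List.foldl_append]; simp
    rw [hsum, List.reverse_append]
    simp only [List.reverse_singleton, List.singleton_append, pvBack]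
    have : ds.foldl (· + ·) 0 + d - d = ds.foldl (· + ·) 0 := by ring
    rw [this, List.reverse_cons, ih, pv_acc_append]
    simp

-- ===== VERDICT (by name: the statement is the Claim_ definition above) =====
theorem compute_descriptor_motzkin_spec : Claim_equal_compute_descriptor_motzkin := by
  intro s _
  show compute_descriptor_motzkin s = compute_descriptor_motzkin_alt s
  unfold compute_descriptor_motzkin compute_descriptor_motzkin_alt
  show _ = (((pvDeltas s.toList).reverse.foldl (fun (st : List Int × Int) d => (st.1 ++ [st.2], st.2 - d)) ([], (pvDeltas s.toList).foldl (· + ·) 0)).1).reverse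
  rw [pv_backfold_eq]
  simpa [pv_back_reverse] using pv_fold_eq s.toList [] 0
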